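-- pv_equiv track=rewrite | github.com/Pa55w0rd/jms-sync | jms_sync/sync/asset_sync.py | _extract_instance_id_from_comment
-- ===== SOURCE A (Python) =====
-- from typing import Dict, List, Any, Optional, Union
--
-- def _extract_instance_id_from_comment(comment: str) -> Optional[str]:
--     """
--     从资产备注中提取实例ID
--
--     Args:
--         comment: 资产备注
--
--     Returns:
--         Optional[str]: 提取的实例ID，如果没有找到则返回None
--     """
--     if not comment:
--         return None
--
--     # 检查常见的实例ID格式
--     if "instance_id:" in comment:
--         # 找到实例ID行并提取
--         lines = comment.split("\n")
--         for line in lines: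
--             if "instance_id:" in line:
--                 parts = line.split("instance_id:", 1)
--                 if len(parts) > 1:
--                     return parts[1].strip()
--
--     return None
-- ===== SOURCE B (Python) =====
-- from typing import Optional
--
--
-- def _extract_instance_id_from_comment(comment: str) -> Optional[str]:
--     idx = comment.find("instance_id:")
--     if idx == -1:
--         return None
--     rest = comment[idx + len("instance_id:"):]
--     return rest.split("\n", 1)[0].strip()
-- ===== Notes on version B (the rewrite author's own statement) =====
-- stated objective: simpler
-- what changed: Replaces split-into-all-lines plus a per-line substring-test-and-split loop with a single find of the first occurrence, one slice, and one split at the first newline.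
import Mathlib
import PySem

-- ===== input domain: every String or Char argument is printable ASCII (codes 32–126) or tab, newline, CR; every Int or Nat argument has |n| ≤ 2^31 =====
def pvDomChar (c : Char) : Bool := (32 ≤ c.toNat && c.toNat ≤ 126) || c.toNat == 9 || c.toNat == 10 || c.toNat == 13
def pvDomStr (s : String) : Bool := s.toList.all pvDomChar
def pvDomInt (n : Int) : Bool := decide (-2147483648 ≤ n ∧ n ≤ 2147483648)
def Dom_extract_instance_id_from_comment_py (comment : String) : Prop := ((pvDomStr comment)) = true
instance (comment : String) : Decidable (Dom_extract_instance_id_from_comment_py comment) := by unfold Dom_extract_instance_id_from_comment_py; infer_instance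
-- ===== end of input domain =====

-- B replaces A's split-into-all-lines-then-scan loop by one find + slice + split-at-first-newline (objective: simpler).

-- ===== PORT A =====
-- the 'for line in lines' loop of A
def extract_instance_id_from_comment_py_loop : List String → Option String
  | [] => none
  | line :: rest =>
    if PySem.Str.isIn "instance_id:" line then
      -- line.split("instance_id:", 1); the separator is nonempty so split never raises (.getD [] unreachable)
      let parts := (PySem.Str.splitMax? line "instance_id:" 1).getD []
      if 1 < parts.length then some (PySem.Str.strip (parts.getD 1 ""))
      else extract_instance_id_from_comment_py_loop rest
    else extract_instance_id_from_comment_py_loop rest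

def extract_instance_id_from_comment_py (comment : String) : Option String :=
  if comment = "" then none
  else if PySem.Str.isIn "instance_id:" comment then
    -- comment.split("\n"); the separator is nonempty so split never raises (.getD [] unreachable)
    extract_instance_id_from_comment_py_loop ((PySem.Str.split? comment "\n").getD [])
  else none

-- ===== PORT B =====
def extract_instance_id_from_comment_py_alt (comment : String) : Option String :=
  let idx := PySem.Str.find comment "instance_id:"
  if idx = -1 then none
  else
    let rest := PySem.Str.slice comment (some (idx + PySem.Str.len "instance_id:")) none
    -- rest.split("\n", 1)[0].strip(); the separator is nonempty so split never raises (.getD [] unreachable)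
    some (PySem.Str.strip (((PySem.Str.splitMax? rest "\n" 1).getD []).getD 0 ""))

-- ===== PRECONDITION & SPEC =====
def Spec_extract_instance_id_from_comment_py (comment : String) (out : Option String) : Prop := out = extract_instance_id_from_comment_py_alt comment
instance (comment : String) (out : Option String) : Decidable (Spec_extract_instance_id_from_comment_py comment out) := by unfold Spec_extract_instance_id_from_comment_py; infer_instance

-- ===== CLAIM (what is proved, stated in full; the proofs are below) =====
def Claim_equal_extract_instance_id_from_comment_py : Prop := ∀ (comment : String), Dom_extract_instance_id_from_comment_py comment → Spec_extract_instance_id_from_comment_py comment (extract_instance_id_from_comment_py comment)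

-- ===== LEMMAS AND PROOFS =====
set_option maxHeartbeats 1000000

-- the tag, on the char-list side
def pvSub : List Char := "instance_id:".toList

-- char-level reference scan: first occurrence of the tag, then the rest of its line, stripped
def pvRefC : List Char → Option (List Char)
  | [] => none
  | c :: rest =>
    if pvSub.isPrefixOf (c :: rest) then
      some (PySem.Chars.strip (((c :: rest).drop 12).takeWhile (· ≠ '\n')))
    else pvRefC rest

-- char-level image of A's line loop
def pvLoopC : List (List Char) → Option (List Char)
  | [] => none
  | line :: ls =>
    if PySem.Chars.isIn pvSub line then
      let parts := PySem.Chars.splitOnMax line pvSub 1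
      if 1 < parts.length then some (PySem.Chars.strip (parts.getD 1 []))
      else pvLoopC ls
    else pvLoopC ls

-- ---- splitOn.go / splitOnMax.go characterisations ----
theorem pv_splitOn_go (sep : List Char) (hsep : sep ≠ []) (n : Nat) :
    ∀ (l : List Char) (fuel : Nat) (cur : List Char) (acc : List (List Char)),
      l.length ≤ n → l.length < fuel →
      PySem.Chars.splitOn.go sep fuel l cur acc =
        acc.reverse ++ (cur.reverse ++ (PySem.Chars.splitOn l sep).headI) ::
          (PySem.Chars.splitOn l sep).tail := by
  have hs1 : 1 ≤ sep.length := by cases sep with | nil => exact absurd rfl hsep | cons a s => simp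
  induction n using Nat.strong_induction_on with
  | _ n IH =>
  intro l fuel cur acc hn hf
  match l, fuel with
  | [], 0 => omega
  | [], fuel+1 =>
    simp [PySem.Chars.splitOn.go, PySem.Chars.splitOn]
  | c :: rest, 0 => omega
  | c :: rest, fuel+1 =>
    have hn' : rest.length < n := by simp at hn; omega
    have hdl : (List.drop sep.length (c :: rest)).length ≤ rest.length := by
      simp only [List.length_drop, List.length_cons]; omega
    rw [PySem.Chars.splitOn.go]
    have hsplit : PySem.Chars.splitOn (c :: rest) sep
        = PySem.Chars.splitOn.go sep (rest.length + 1 + 1) (c :: rest) [] [] := by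
      simp [PySem.Chars.splitOn]
    split_ifs with hp
    · rw [IH rest.length hn' _ fuel [] (cur.reverse :: acc) hdl (by simp at hf; omega)]
      rw [hsplit, PySem.Chars.splitOn.go]
      simp only [hp, if_true, List.reverse_nil]
      rw [IH rest.length hn' _ (rest.length+1) [] [[]] hdl (by omega)]
      simp
    · rw [IH rest.length hn' rest fuel (c :: cur) acc (le_refl _) (by simp at hf ⊢; omega)]
      rw [hsplit, PySem.Chars.splitOn.go]
      simp only [hp, if_false, List.reverse_nil]
      rw [IH rest.length hn' rest (rest.length+1) [c] [] (le_refl _) (by omega)]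
      simp

theorem pv_splitOn_nil (sep : List Char) (hsep : sep ≠ []) :
    PySem.Chars.splitOn [] sep = [[]] := by
  simp [PySem.Chars.splitOn, PySem.Chars.splitOn.go]

theorem pv_splitOn_eta (sep : List Char) (hsep : sep ≠ []) (l : List Char) :
    PySem.Chars.splitOn l sep =
      (PySem.Chars.splitOn l sep).headI :: (PySem.Chars.splitOn l sep).tail := by
  conv_lhs => rw [PySem.Chars.splitOn]
  rw [pv_splitOn_go sep hsep l.length l (l.length+1) [] [] le_rfl (by omega)]
  simp

theorem pv_splitOn_prefix (sep : List Char) (hsep : sep ≠ []) (c : Char) (rest : List Char)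
    (hp : sep.isPrefixOf (c :: rest) = true) :
    PySem.Chars.splitOn (c :: rest) sep =
      [] :: PySem.Chars.splitOn (List.drop sep.length (c :: rest)) sep := by
  have hs1 : 1 ≤ sep.length := by cases sep with | nil => exact absurd rfl hsep | cons a s => simp
  have hdl : (List.drop sep.length (c :: rest)).length ≤ rest.length := by
    simp only [List.length_drop, List.length_cons]; omega
  conv_lhs => rw [PySem.Chars.splitOn]
  simp only [List.length_cons]
  rw [PySem.Chars.splitOn.go]
  simp only [hp, if_true, List.reverse_nil]
  rw [pv_splitOn_go sep hsep rest.length _ (rest.length+1) [] [[]] hdl (by omega)]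
  conv_rhs => rw [pv_splitOn_eta sep hsep]
  simp

theorem pv_splitOn_not_prefix (sep : List Char) (hsep : sep ≠ []) (c : Char) (rest : List Char)
    (hp : sep.isPrefixOf (c :: rest) = false) :
    PySem.Chars.splitOn (c :: rest) sep =
      (c :: (PySem.Chars.splitOn rest sep).headI) :: (PySem.Chars.splitOn rest sep).tail := by
  conv_lhs => rw [PySem.Chars.splitOn]
  simp only [List.length_cons]
  rw [PySem.Chars.splitOn.go]
  simp only [hp, List.reverse_nil]
  rw [pv_splitOn_go sep hsep rest.length rest (rest.length+1) [c] [] le_rfl (by omega)]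
  simp

theorem pv_splitOnMax_go_zero (sep : List Char) :
    ∀ (fuel : Nat) (l cur : List Char) (acc : List (List Char)),
      PySem.Chars.splitOnMax.go sep fuel 0 l cur acc = ((cur.reverse ++ l) :: acc).reverse := by
  intro fuel l cur acc
  match fuel, l with
  | 0, l => rw [PySem.Chars.splitOnMax.go]
  | fuel+1, [] => rw [PySem.Chars.splitOnMax.go] <;> simp
  | fuel+1, c :: rest => rw [PySem.Chars.splitOnMax.go] <;> simp

theorem pv_splitOnMax_go (sep : List Char) (hsep : sep ≠ []) (n : Nat) :
    ∀ (l : List Char) (fuel : Nat) (cur : List Char) (acc : List (List Char)),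
      l.length ≤ n → l.length < fuel →
      PySem.Chars.splitOnMax.go sep fuel 1 l cur acc =
        acc.reverse ++ (cur.reverse ++ (PySem.Chars.splitOnMax l sep 1).headI) ::
          (PySem.Chars.splitOnMax l sep 1).tail := by
  have hs1 : 1 ≤ sep.length := by cases sep with | nil => exact absurd rfl hsep | cons a s => simp
  induction n using Nat.strong_induction_on with
  | _ n IH =>
  intro l fuel cur acc hn hf
  match l, fuel with
  | [], 0 => omega
  | [], fuel+1 =>
    simp [PySem.Chars.splitOnMax.go, PySem.Chars.splitOnMax]
  | c :: rest, 0 => omega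
  | c :: rest, fuel+1 =>
    have hn' : rest.length < n := by simp at hn; omega
    have hdl : (List.drop sep.length (c :: rest)).length ≤ rest.length := by
      simp only [List.length_drop, List.length_cons]; omega
    rw [PySem.Chars.splitOnMax.go]
    have hsplit : PySem.Chars.splitOnMax (c :: rest) sep 1
        = PySem.Chars.splitOnMax.go sep (rest.length + 1 + 1) 1 (c :: rest) [] [] := by
      simp [PySem.Chars.splitOnMax]
    simp only [Nat.one_ne_zero, if_false]
    split_ifs with hp
    · rw [pv_splitOnMax_go_zero]
      rw [hsplit, PySem.Chars.splitOnMax.go]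
      simp only [Nat.one_ne_zero, if_false, hp, if_true, List.reverse_nil]
      rw [pv_splitOnMax_go_zero]
      simp
    · rw [IH rest.length hn' rest fuel (c :: cur) acc le_rfl (by simp at hf ⊢; omega)]
      rw [hsplit, PySem.Chars.splitOnMax.go]
      simp only [Nat.one_ne_zero, if_false, hp, List.reverse_nil]
      rw [IH rest.length hn' rest (rest.length+1) [c] [] le_rfl (by omega)]
      simp

theorem pv_splitOnMax_eta (sep : List Char) (hsep : sep ≠ []) (l : List Char) :
    PySem.Chars.splitOnMax l sep 1 =
      (PySem.Chars.splitOnMax l sep 1).headI :: (PySem.Chars.splitOnMax l sep 1).tail := by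
  conv_lhs => rw [PySem.Chars.splitOnMax]
  rw [if_neg (by omega)]
  simp only [Int.toNat_one]
  rw [pv_splitOnMax_go sep hsep l.length l (l.length+1) [] [] le_rfl (by omega)]
  simp

theorem pv_splitOnMax_prefix (sep : List Char) (hsep : sep ≠ []) (c : Char) (rest : List Char)
    (hp : sep.isPrefixOf (c :: rest) = true) :
    PySem.Chars.splitOnMax (c :: rest) sep 1 = [[], List.drop sep.length (c :: rest)] := by
  conv_lhs => rw [PySem.Chars.splitOnMax]
  rw [if_neg (by omega)]
  simp only [List.length_cons]
  rw [PySem.Chars.splitOnMax.go]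
  simp only [Int.toNat_one, Nat.one_ne_zero, if_false, hp, if_true, List.reverse_nil]
  rw [pv_splitOnMax_go_zero]
  simp

theorem pv_splitOnMax_not_prefix (sep : List Char) (hsep : sep ≠ []) (c : Char) (rest : List Char)
    (hp : sep.isPrefixOf (c :: rest) = false) :
    PySem.Chars.splitOnMax (c :: rest) sep 1 =
      (c :: (PySem.Chars.splitOnMax rest sep 1).headI) :: (PySem.Chars.splitOnMax rest sep 1).tail := by
  conv_lhs => rw [PySem.Chars.splitOnMax]
  rw [if_neg (by omega)]
  simp only [List.length_cons]
  rw [PySem.Chars.splitOnMax.go]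
  simp only [Int.toNat_one, Nat.one_ne_zero, if_false, hp, List.reverse_nil]
  rw [pv_splitOnMax_go sep hsep rest.length rest (rest.length+1) [c] [] le_rfl (by omega)]
  simp

theorem pv_splitOnMax_nil (sep : List Char) (hsep : sep ≠ []) :
    PySem.Chars.splitOnMax [] sep 1 = [[]] := by
  rw [PySem.Chars.splitOnMax, if_neg (by omega), PySem.Chars.splitOnMax.go] <;> simp

theorem pv_splitOn_headI (d : Char) (cs : List Char) :
    (PySem.Chars.splitOn cs [d]).headI = cs.takeWhile (· ≠ d) := by
  induction cs with
  | nil => rw [pv_splitOn_nil [d] (by simp)]; simp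
  | cons c rest ih =>
    by_cases h : c = d
    · subst h
      rw [pv_splitOn_prefix [c] (by simp) c rest (by simp [List.isPrefixOf])]
      simp [List.takeWhile]
    · rw [pv_splitOn_not_prefix [d] (by simp) c rest (by simp [List.isPrefixOf]; exact fun hd => h hd.symm)]
      simp [List.takeWhile, h, ih]

theorem pv_splitOnMax_headI (d : Char) (cs : List Char) :
    (PySem.Chars.splitOnMax cs [d] 1).headI = cs.takeWhile (· ≠ d) := by
  induction cs with
  | nil => rw [pv_splitOnMax_nil [d] (by simp)]; simp
  | cons c rest ih =>
    by_cases h : c = d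
    · subst h
      rw [pv_splitOnMax_prefix [c] (by simp) c rest (by simp [List.isPrefixOf])]
      simp [List.takeWhile]
    · rw [pv_splitOnMax_not_prefix [d] (by simp) c rest (by simp [List.isPrefixOf]; exact fun hd => h hd.symm)]
      simp [List.takeWhile, h, ih]

theorem pv_prefix_takeWhile (cs : List Char) (h : pvSub <+: cs) :
    cs.takeWhile (· ≠ '\n') = pvSub ++ (cs.drop 12).takeWhile (· ≠ '\n') := by
  obtain ⟨t, rfl⟩ := h
  rw [List.takeWhile_append]
  have hself : pvSub.takeWhile (· ≠ '\n') = pvSub := by decide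
  rw [hself]
  simp [show pvSub.length = 12 from by decide]

theorem pv_refC_none (cs : List Char) (h : ¬ pvSub <:+: cs) : pvRefC cs = none := by
  induction cs with
  | nil => rfl
  | cons c rest ih =>
    rw [pvRefC]
    rw [if_neg]
    · exact ih (fun hi => h (hi.trans (List.suffix_cons c rest).isInfix))
    · intro hp
      exact h (List.isPrefixOf_iff_prefix.mp hp).isInfix

theorem pv_refC_found (n : Nat) : ∀ (cs : List Char) (k : Nat),
    cs.length ≤ n →
    pvSub <+: cs.drop k → (∀ i, i < k → ¬ pvSub <+: cs.drop i) →
    pvRefC cs = some (PySem.Chars.strip (((cs.drop k).drop 12).takeWhile (· ≠ '\n'))) := by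
  induction n with
  | zero =>
    intro cs k hn hp _
    exfalso
    have h1 := hp.length_le
    have h2 : pvSub.length = 12 := by decide
    have h3 : (cs.drop k).length ≤ cs.length := by simp
    omega
  | succ n ih =>
    intro cs k hn hp hmin
    match cs with
    | [] =>
      exfalso
      have := hp.length_le
      simp at this
      revert this; decide
    | c :: rest =>
      match k with
      | 0 =>
        rw [pvRefC]
        rw [if_pos (List.isPrefixOf_iff_prefix.mpr (by simpa using hp))]
        simp
      | k+1 =>
        have hnp : ¬ pvSub.isPrefixOf (c :: rest) = true := by
          intro hb
          exact hmin 0 (by omega) (by simpa using List.isPrefixOf_iff_prefix.mp hb)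
        rw [pvRefC, if_neg hnp]
        exact ih rest k (by simp at hn; omega) (by simpa using hp)
          (fun i hi => by simpa using hmin (i+1) (by omega))

theorem pv_loop_eq_ref (n : Nat) : ∀ (cs : List Char), cs.length ≤ n →
    pvLoopC (PySem.Chars.splitOn cs ['\n']) = pvRefC cs := by
  induction n with
  | zero =>
    intro cs hn
    match cs with
    | [] =>
      rw [pv_splitOn_nil ['\n'] (by simp)]
      rw [pvLoopC]
      rw [if_neg (by decide)]
      rfl
  | succ n ih =>
    intro cs hn
    match cs with
    | [] =>
      rw [pv_splitOn_nil ['\n'] (by simp)]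
      rw [pvLoopC]
      rw [if_neg (by decide)]
      rfl
    | c :: rest =>
      have hrest : rest.length ≤ n := by simp at hn; omega
      by_cases hc : c = '\n'
      · subst hc
        rw [pv_splitOn_prefix ['\n'] (by simp) _ rest (by simp [List.isPrefixOf])]
        norm_num [List.drop_succ_cons]
        rw [pvLoopC]
        rw [if_neg (by decide)]
        rw [ih rest hrest]
        rw [pvRefC]
        rw [if_neg (by simp [show pvSub = 'i'::"nstance_id:".toList from by decide, List.isPrefixOf])]
      · have hnp : (['\n'] : List Char).isPrefixOf (c :: rest) = false := by
          simp [List.isPrefixOf]; exact fun h => hc h.symm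
        rw [pv_splitOn_not_prefix ['\n'] (by simp) c rest hnp]
        have hline : c :: (PySem.Chars.splitOn rest ['\n']).headI
            = (c :: rest).takeWhile (· ≠ '\n') := by
          rw [pv_splitOn_headI '\n' rest]
          simp [List.takeWhile, hc]
        have hIH : pvLoopC ((PySem.Chars.splitOn rest ['\n']).headI
            :: (PySem.Chars.splitOn rest ['\n']).tail) = pvRefC rest := by
          rw [← pv_splitOn_eta ['\n'] (by simp)]
          exact ih rest hrest
        set h := (PySem.Chars.splitOn rest ['\n']).headI with hh
        set t := (PySem.Chars.splitOn rest ['\n']).tail with ht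
        by_cases hpre : pvSub.isPrefixOf (c :: rest) = true
        · -- tag at position 0 of this line
          have hpre' : pvSub <+: (c :: rest) := List.isPrefixOf_iff_prefix.mp hpre
          have htw : (c :: rest).takeWhile (· ≠ '\n')
              = pvSub ++ ((c :: rest).drop 12).takeWhile (· ≠ '\n') := pv_prefix_takeWhile _ hpre'
          have hch : (c :: h) = pvSub ++ ((c :: rest).drop 12).takeWhile (· ≠ '\n') := by
            rw [hline, htw]
          have hpl : pvSub <+: (c :: h) := by rw [hch]; exact ⟨_, rfl⟩
          have hR : pvRefC (c :: rest)
              = some (PySem.Chars.strip (((c :: rest).drop 12).takeWhile (· ≠ '\n'))) := by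
            rw [pvRefC, if_pos hpre]
          rw [hR, pvLoopC]
          rw [if_pos ((PySem.Chars.isIn_iff_infix _ _).mpr hpl.isInfix)]
          simp only
          rw [pv_splitOnMax_prefix pvSub (by decide) c h (List.isPrefixOf_iff_prefix.mpr hpl)]
          rw [if_pos (by simp)]
          have hdropline : List.drop pvSub.length (c :: h)
              = ((c :: rest).drop 12).takeWhile (· ≠ '\n') := by
            rw [hch, List.drop_left]
          simp only [List.getD_cons_succ, List.getD_cons_zero]
          rw [hdropline]
        · -- tag not at the head of this line
          have hpre2 : ¬ pvSub <+: (c :: h) := by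
            intro hp
            exact hpre (List.isPrefixOf_iff_prefix.mpr
              (hp.trans (hline ▸ List.takeWhile_prefix _)))
          have hiin : PySem.Chars.isIn pvSub (c :: h) = PySem.Chars.isIn pvSub h := by
            by_cases hin : PySem.Chars.isIn pvSub h = true
            · rw [hin, (PySem.Chars.isIn_iff_infix _ _).mpr
                (((PySem.Chars.isIn_iff_infix _ _).mp hin).trans (List.suffix_cons c h).isInfix)]
            · have hf : PySem.Chars.isIn pvSub h = false := by simpa using hin
              rw [hf]
              rw [PySem.Chars.isIn_eq_false_iff] at hf ⊢
              intro hinf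
              rcases List.infix_cons_iff.mp hinf with hp | hi
              · exact hpre2 hp
              · exact hf hi
          have hR : pvRefC (c :: rest) = pvRefC rest := by
            rw [pvRefC, if_neg (by simpa using hpre)]
          rw [hR, ← hIH]
          rw [pvLoopC, hiin]
          conv_rhs => rw [pvLoopC]
          by_cases hin : PySem.Chars.isIn pvSub h = true
          · rw [if_pos hin, if_pos hin]
            simp only
            rw [pv_splitOnMax_not_prefix pvSub (by decide) c h
              (by rw [Bool.eq_false_iff]; intro hb; exact hpre2 (List.isPrefixOf_iff_prefix.mp (by simpa using hb)))]
            conv_rhs => rw [pv_splitOnMax_eta pvSub (by decide) h]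
            simp
          · rw [if_neg (by simpa using hin), if_neg (by simpa using hin)]

-- ---- bridges: the String-level ports compute the char-level programs ----
-- splitMax? on a nonempty separator returns the list, bridged to char level
theorem pv_splitMax_bridge (line sep : String) (hsep : sep.toList ≠ []) :
    ∃ ps : List String, PySem.Str.splitMax? line sep 1 = some ps ∧
      ps.map String.toList = PySem.Chars.splitOnMax line.toList sep.toList 1 := by
  have h := PySem.Str.splitMax?_map line sep 1
  rw [PySem.Chars.splitMax?] at h
  rw [if_neg (by simpa using hsep)] at h
  obtain ⟨ps, hps, hmap⟩ := Option.map_eq_some_iff.mp h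
  exact ⟨ps, hps, hmap⟩

theorem pv_bridge_loop (lines : List String) :
    (extract_instance_id_from_comment_py_loop lines).map String.toList =
      pvLoopC (lines.map String.toList) := by
  induction lines with
  | nil => rfl
  | cons line rest ih =>
    rw [extract_instance_id_from_comment_py_loop]
    rw [List.map_cons, pvLoopC]
    rw [show PySem.Str.isIn "instance_id:" line
        = PySem.Chars.isIn pvSub line.toList from PySem.Str.isIn_eq _ _]
    by_cases hin : PySem.Chars.isIn pvSub line.toList = true
    · rw [if_pos hin, if_pos hin]
      obtain ⟨ps, hps, hmap⟩ := pv_splitMax_bridge line "instance_id:" (by decide)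
      rw [show ("instance_id:".toList : List Char) = pvSub from rfl] at hmap
      rw [hps]
      simp only [Option.getD_some]
      have hlen : ps.length = (PySem.Chars.splitOnMax line.toList pvSub 1).length := by
        rw [← hmap]; simp
      by_cases hl : 1 < ps.length
      · rw [if_pos hl, if_pos (by omega)]
        simp only [Option.map_some]
        congr 1
        rw [PySem.Str.toList_strip]
        congr 1
        have := List.getD_map ps "" (n := 1) String.toList
        rw [hmap] at this
        simpa using this.symm
      · rw [if_neg hl, if_neg (by omega)]
        exact ih
    · rw [if_neg hin, if_neg hin]
      exact ih

theorem pv_bridge_A (comment : String) :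
    (extract_instance_id_from_comment_py comment).map String.toList =
      (if comment.toList = [] then none
       else if PySem.Chars.isIn pvSub comment.toList then
         pvLoopC (PySem.Chars.splitOn comment.toList ['\n'])
       else none) := by
  rw [extract_instance_id_from_comment_py]
  by_cases hemp : comment = ""
  · rw [if_pos hemp, if_pos (by rw [hemp]; rfl)]
    rfl
  · rw [if_neg hemp, if_neg (fun h => hemp (String.toList_eq_nil_iff.mp h))]
    rw [show PySem.Str.isIn "instance_id:" comment
        = PySem.Chars.isIn pvSub comment.toList from PySem.Str.isIn_eq _ _]
    by_cases hin : PySem.Chars.isIn pvSub comment.toList = true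
    · rw [if_pos hin, if_pos hin]
      have h := PySem.Str.split?_map comment "\n"
      rw [PySem.Chars.split?] at h
      rw [if_neg (by decide)] at h
      obtain ⟨lines, hl, hmap⟩ := Option.map_eq_some_iff.mp h
      rw [hl]
      simp only [Option.getD_some]
      rw [pv_bridge_loop, hmap]
      rfl
    · rw [if_neg hin, if_neg hin]
      rfl

theorem pv_bridge_B (comment : String) :
    (extract_instance_id_from_comment_py_alt comment).map String.toList =
      pvRefC comment.toList := by
  rw [extract_instance_id_from_comment_py_alt]
  simp only
  rw [show PySem.Str.find comment "instance_id:"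
      = PySem.Chars.find comment.toList pvSub from PySem.Str.find_eq _ _]
  set j := PySem.Chars.find comment.toList pvSub with hj
  by_cases hneg : j = -1
  · rw [if_pos hneg]
    rw [pv_refC_none comment.toList (by
      rw [← PySem.Chars.find_eq_neg_one_iff, ← hj]; exact hneg)]
    rfl
  · rw [if_neg hneg]
    have hge : 0 ≤ j := by
      have := PySem.Chars.neg_one_le_find comment.toList pvSub
      rw [← hj] at this; omega
    obtain ⟨hocc, hmin⟩ := PySem.Chars.find_spec (s := comment.toList) (sub := pvSub) (by rw [← hj]; exact hge)
    rw [← hj] at hocc hmin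
    have hlen12 : PySem.Str.len "instance_id:" = 12 := by decide
    rw [hlen12]
    -- the sliced rest, on the char side
    have hrest : (PySem.Str.slice comment (some (j + 12)) none).toList
        = comment.toList.drop (j.toNat + 12) := by
      rw [PySem.Str.toList_slice]
      rw [PySem.Chars.slice_eq_listSlice]
      rw [PySem.List.slice_from comment.toList (by omega)]
      congr 1
      omega
    obtain ⟨ps, hps, hmap⟩ := pv_splitMax_bridge (PySem.Str.slice comment (some (j + 12)) none) "\n" (by decide)
    rw [hps]
    simp only [Option.getD_some, Option.map_some]
    rw [pv_refC_found comment.toList.length comment.toList j.toNat le_rfl hocc hmin]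
    congr 1
    rw [PySem.Str.toList_strip]
    have hgd : (ps.getD 0 "").toList
        = (PySem.Chars.splitOnMax ((PySem.Str.slice comment (some (j + 12)) none)).toList ("\n".toList) 1).getD 0 [] := by
      have := List.getD_map ps "" (n := 0) String.toList
      rw [hmap] at this
      simpa using this.symm
    rw [hgd, hrest]
    have hcons := pv_splitOnMax_eta ['\n'] (by simp) (comment.toList.drop (j.toNat + 12))
    rw [show ("\n".toList : List Char) = ['\n'] from rfl, hcons]
    rw [List.getD_cons_zero]
    rw [pv_splitOnMax_headI]
    rw [List.drop_drop]

-- ===== VERDICT (by name: the statement is the Claim_ definition above) =====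
theorem extract_instance_id_from_comment_py_spec : Claim_equal_extract_instance_id_from_comment_py := by
  intro comment _
  unfold Spec_extract_instance_id_from_comment_py
  apply Option.map_injective (f := String.toList) (fun _ _ h => String.toList_inj.mp h)
  rw [pv_bridge_A, pv_bridge_B]
  by_cases hemp : comment.toList = []
  · rw [if_pos hemp, hemp]
    rfl
  · rw [if_neg hemp]
    by_cases hin : PySem.Chars.isIn pvSub comment.toList = true
    · rw [if_pos hin]
      exact pv_loop_eq_ref comment.toList.length comment.toList le_rfl
    · rw [if_neg hin]
      exact (pv_refC_none comment.toList
        ((PySem.Chars.isIn_eq_false_iff _ _).mp (by simpa using hin))).symm
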